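-- pv_equiv track=rewrite | github.com/ewhacote/ewhaCote_gmkim | week6/0801_135807_gmkim.py | solution
-- ===== SOURCE A (Python) =====
-- def gcd(a, b):
--     if a % b == 0:
--         return b
--     return gcd(b, a % b)
--
-- def notDiv(array, gcd):
--     for n in array:
--         if n % gcd == 0:
--             return False
--     return True
--
-- def solution(arrayA, arrayB):
--     answer = 0
--
--     gcdA = arrayA[0]
--     gcdB = arrayB[0]
--
--     for n in arrayA[1:]:
--         gcdA = gcd(n, gcdA)
--
--     for n in arrayB[1:]:
--         gcdB = gcd(n, gcdB)
--
--     if notDiv(arrayA, gcdB):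
--         answer = max(answer, gcdB)
--
--     if notDiv(arrayB, gcdA):
--         answer = max(answer, gcdA)
--
--     return answer
-- ===== SOURCE B (Python) =====
-- def solution(arrayA, arrayB):
--     def fold_gcd(arr):
--         g = arr[0]
--         for n in arr[1:]:
--             while n % g != 0:
--                 n, g = g, n % g
--         return g
--
--     gA = fold_gcd(arrayA)
--     gB = fold_gcd(arrayB)
--     cands = [g for g, arr in ((gB, arrayA), (gA, arrayB))
--              if all(n % g != 0 for n in arr)]
--     return max([0] + cands)
-- ===== Notes on version B (the rewrite author's own statement) =====
-- stated objective: alternative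
-- what changed: The recursive gcd helper becomes an iterative Euclid loop fused into a single per-array pass, the early-return notDiv scan becomes an all(...) test, and the answer accumulator with two if/max steps becomes a candidate comprehension reduced by one max.
import Mathlib
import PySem

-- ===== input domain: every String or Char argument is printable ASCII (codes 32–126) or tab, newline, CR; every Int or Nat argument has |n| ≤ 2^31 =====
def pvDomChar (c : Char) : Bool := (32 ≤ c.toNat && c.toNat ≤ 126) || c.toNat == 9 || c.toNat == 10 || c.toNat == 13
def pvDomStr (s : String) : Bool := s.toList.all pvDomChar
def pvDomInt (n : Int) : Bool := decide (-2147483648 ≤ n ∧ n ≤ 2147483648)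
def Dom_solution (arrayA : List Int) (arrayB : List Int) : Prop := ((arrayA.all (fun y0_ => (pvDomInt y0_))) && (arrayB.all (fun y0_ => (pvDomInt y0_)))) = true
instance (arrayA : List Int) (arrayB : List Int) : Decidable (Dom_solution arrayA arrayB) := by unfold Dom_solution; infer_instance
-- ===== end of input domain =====

-- B keeps the per-array gcd but uses an iterative Euclid loop fused into one pass,
-- and replaces the accumulator/ifs with a candidate comprehension and one max (objective: alternative decomposition).

-- |a % b| < |b| for b != 0 (Python floor-mod)
theorem pvModNatAbsLt (a b : Int) (hb : b ≠ 0) :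
    (PySem.Int.mod a b).natAbs < b.natAbs := by
  rcases lt_or_gt_of_ne hb with h | h
  · have := PySem.Int.mod_neg_bounds a h
    omega
  · have h1 := PySem.Int.mod_nonneg a h
    have h2 := PySem.Int.mod_lt a h
    omega

-- termination helper for both Euclid ports (cited in decreasing_by)
theorem pvMeasureLt (a b : Int) (h : ¬ PySem.Int.mod a b = 0) :
    (if PySem.Int.mod a b = 0 then b.natAbs + 1 else (PySem.Int.mod a b).natAbs)
      < (if b = 0 then a.natAbs + 1 else b.natAbs) := by
  rw [if_neg h]
  by_cases hb : b = 0
  · subst hb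
    rw [if_pos rfl]
    simp only [PySem.Int.mod, Int.fmod_zero]
    omega
  · rw [if_neg hb]; exact pvModNatAbsLt a b hb

-- ===== PORT A =====
-- def gcd(a, b): if a % b == 0: return b; return gcd(b, a % b)
def pyGcd (a b : Int) : Int :=
  if PySem.Int.mod a b = 0 then b else pyGcd b (PySem.Int.mod a b)
termination_by (if b = 0 then a.natAbs + 1 else b.natAbs)
decreasing_by exact pvMeasureLt a b ‹_›

-- def notDiv(array, gcd): early-return scan
def notDivA : List Int → Int → Bool
  | [], _ => true
  | n :: rest, g => if PySem.Int.mod n g = 0 then false else notDivA rest g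

def solution (arrayA : List Int) (arrayB : List Int) : Int :=
  match arrayA, arrayB with
  | a0 :: _, b0 :: _ =>
    -- answer = 0; gcdA = arrayA[0]; gcdB = arrayB[0]; the two for-loops over arr[1:]
    let gcdA := (PySem.List.slice arrayA (some 1) none).foldl (fun g n => pyGcd n g) a0
    let gcdB := (PySem.List.slice arrayB (some 1) none).foldl (fun g n => pyGcd n g) b0
    let answer : Int := 0
    let answer := if notDivA arrayA gcdB then max answer gcdB else answer
    let answer := if notDivA arrayB gcdA then max answer gcdA else answer
    answer
  | _, _ => 0  -- Python raises IndexError on an empty array; excluded by Pre_solution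

-- ===== PORT B =====
-- inner `while n % g != 0: n, g = g, n % g` loop, returning the final g
def euclidLoop (n g : Int) : Int :=
  if PySem.Int.mod n g = 0 then g else euclidLoop g (PySem.Int.mod n g)
termination_by (if g = 0 then n.natAbs + 1 else g.natAbs)
decreasing_by exact pvMeasureLt n g ‹_›

-- `for n in arr[1:]:` body of fold_gcd
def foldGcdGo : List Int → Int → Int
  | [], g => g
  | n :: rest, g => foldGcdGo rest (euclidLoop n g)

-- def fold_gcd(arr)
def foldGcd : List Int → Int
  | [] => 0  -- Python raises IndexError here; excluded by Pre_solution
  | a0 :: rest => foldGcdGo rest a0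

def solution_alt (arrayA : List Int) (arrayB : List Int) : Int :=
  let gA := foldGcd arrayA
  let gB := foldGcd arrayB
  let cands := ([(gB, arrayA), (gA, arrayB)].filter
      (fun p => p.2.all (fun n => PySem.Int.mod n p.1 != 0))).map (fun p => p.1)
  cands.foldl max 0  -- max([0] + cands)

-- ===== PRECONDITION & SPEC =====
-- Pre_ excludes exactly the inputs where A raises: an empty array (IndexError) or an array whose
-- first element is 0 (ZeroDivisionError in gcd or notDiv).
def Pre_solution (arrayA : List Int) (arrayB : List Int) : Prop :=
  arrayA ≠ [] ∧ arrayB ≠ [] ∧ arrayA.headI ≠ 0 ∧ arrayB.headI ≠ 0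
instance (arrayA : List Int) (arrayB : List Int) : Decidable (Pre_solution arrayA arrayB) := by
  unfold Pre_solution; infer_instance

def pvWitness_solution : List Int × List Int := ([6, 12], [4, 8])

def Spec_solution (arrayA : List Int) (arrayB : List Int) (out : Int) : Prop := out = solution_alt arrayA arrayB
instance (arrayA : List Int) (arrayB : List Int) (out : Int) : Decidable (Spec_solution arrayA arrayB out) := by unfold Spec_solution; infer_instance

-- ===== CLAIM (what is proved, stated in full; the proofs are below) =====
def Claim_equal_solution : Prop := ∀ (arrayA : List Int) (arrayB : List Int), Dom_solution arrayA arrayB → Pre_solution arrayA arrayB → Spec_solution arrayA arrayB (solution arrayA arrayB)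

-- ===== LEMMAS AND PROOFS =====
theorem pyGcd_eq_euclidLoop (a b : Int) : pyGcd a b = euclidLoop a b := by
  induction a, b using pyGcd.induct with
  | case1 a b h => rw [pyGcd, euclidLoop]; simp [h]
  | case2 a b h ih => rw [pyGcd, euclidLoop]; simp [h, ih]

theorem notDivA_eq_all (arr : List Int) (g : Int) :
    notDivA arr g = arr.all (fun n => PySem.Int.mod n g != 0) := by
  induction arr with
  | nil => rfl
  | cons n rest ih =>
    simp only [notDivA, List.all_cons, ih]
    by_cases h : PySem.Int.mod n g = 0 <;> simp [h]

theorem foldGcdGo_eq_foldl (arr : List Int) (g : Int) :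
    foldGcdGo arr g = arr.foldl (fun g n => euclidLoop n g) g := by
  induction arr generalizing g with
  | nil => rfl
  | cons n rest ih => simp [foldGcdGo, List.foldl_cons, ih]

-- ===== VERDICT (by name: the statement is the Claim_ definition above) =====
theorem solution_spec : Claim_equal_solution := by
  intro arrayA arrayB _ hpre
  obtain ⟨hA, hB, _, _⟩ := hpre
  obtain ⟨a0, restA, rfl⟩ := List.exists_cons_of_ne_nil hA
  obtain ⟨b0, restB, rfl⟩ := List.exists_cons_of_ne_nil hB
  show solution _ _ = solution_alt _ _
  simp only [solution, solution_alt, foldGcd, PySem.List.slice_from_one, List.tail_cons,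
    foldGcdGo_eq_foldl, notDivA_eq_all]
  have hg : ∀ (l : List Int) (g : Int),
      l.foldl (fun g n => pyGcd n g) g = l.foldl (fun g n => euclidLoop n g) g := by
    intro l
    induction l with
    | nil => intro g; rfl
    | cons x xs ih => intro g; simp [List.foldl_cons, pyGcd_eq_euclidLoop]
  rw [hg, hg]
  set gA := (List.foldl (fun g n => euclidLoop n g) a0 restA) with hgA
  set gB := (List.foldl (fun g n => euclidLoop n g) b0 restB) with hgB
  by_cases h1 : (a0 :: restA).all (fun n => PySem.Int.mod n gB != 0) <;>
    by_cases h2 : (b0 :: restB).all (fun n => PySem.Int.mod n gA != 0) <;>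
      simp [h1, h2, List.filter, List.foldl, max_assoc]
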